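-- pv_equiv track=rewrite | github.com/soroushomidvar/LDI | src/tools/dependency_finder.py | remove_substrings_within_longer
-- ===== SOURCE A (Python) =====
-- def remove_substrings_within_longer(data):
--     # Group substrings by their value
--     grouped_data = {}
--     for substring, label in data.items():
--         if label not in grouped_data:
--             grouped_data[label] = []
--         grouped_data[label].append(substring)
--
--     # Function to remove substrings contained within longer ones for each group
--     def remove_substrings_within_longer_per_value(substrings):
--         sorted_substrings = sorted(substrings, key=lambda x: -len(x))
--         filtered_substrings = []
--         seen = set()
--
--         for substring in sorted_substrings:
--             if not any(substring in seen_substring for seen_substring in seen):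
--                 filtered_substrings.append(substring)
--                 seen.add(substring)
--
--         return filtered_substrings
--
--     # Process each group and build the resulting dictionary
--     result = {}
--     for label, substrings in grouped_data.items():
--         filtered_substrings = remove_substrings_within_longer_per_value(substrings)
--         for substring in filtered_substrings:
--             result[substring] = label
--
--     return result
-- ===== SOURCE B (Python) =====
-- def remove_substrings_within_longer(data):
--     # Group substrings by label (insertion order of first label occurrence, as a dict does)
--     grouped = {}
--     for substring, label in data.items():
--         if label not in grouped:
--             grouped[label] = []
--         grouped[label].append(substring)
--
--     # A string survives iff NO strictly longer string of its own group contains it: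
--     # no sequential "seen" set is needed, a direct filter against the group suffices.
--     return {s: label
--             for label, subs in grouped.items()
--             for s in sorted(subs, key=lambda x: -len(x))
--             if not any(len(s) < len(t) and s in t for t in subs)}
-- ===== Notes on version B (the rewrite author's own statement) =====
-- stated objective: simpler
-- what changed: Replaces A's per-group sequential loop that grows a 'seen' set of kept strings and tests membership against it with a direct dict comprehension keeping a string iff no strictly longer string of its own group contains it (the two filters provably coincide on distinct keys), dropping the helper, the seen set and the intermediate lists.
import Mathlib
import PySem

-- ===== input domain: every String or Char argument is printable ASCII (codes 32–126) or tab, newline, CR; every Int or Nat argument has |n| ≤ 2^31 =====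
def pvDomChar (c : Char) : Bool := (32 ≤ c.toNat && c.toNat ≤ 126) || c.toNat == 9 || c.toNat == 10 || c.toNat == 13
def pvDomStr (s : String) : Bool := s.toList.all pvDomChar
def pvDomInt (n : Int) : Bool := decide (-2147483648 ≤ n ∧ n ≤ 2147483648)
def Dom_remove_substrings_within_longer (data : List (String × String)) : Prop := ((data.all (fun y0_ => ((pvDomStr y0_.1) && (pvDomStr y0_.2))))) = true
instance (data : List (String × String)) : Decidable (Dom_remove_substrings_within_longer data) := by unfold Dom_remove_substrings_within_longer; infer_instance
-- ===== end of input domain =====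

-- B replaces A's per-group seen-set loop by a direct filter ("keep s iff no strictly
-- longer string of its group contains it") in a single dict comprehension; objective: simpler.


-- ===== PORT A =====
-- shared helper: both Pythons build the label → substrings dict with the same loop
def pvGStep (g : PySem.Dict String (List String)) (p : String × String) : PySem.Dict String (List String) :=
  (if g.contains p.2 then g else g.insert p.2 []).modify p.2 [] (fun l => l ++ [p.1])

def pvGroup (data : List (String × String)) : PySem.Dict String (List String) :=
  data.foldl pvGStep PySem.Dict.empty

-- shared helper: sorted(…, key=lambda x: -len(x)), used verbatim by both Pythons
def pvSortDesc (xs : List String) : List String :=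
  PySem.List.sorted xs (fun x => -(PySem.Str.len x)) false

-- A's loop body: 'if not any(substring in seen_substring for seen_substring in seen): append; seen.add'
def pvStepA (st : List String × PySem.Set String) (s : String) : List String × PySem.Set String :=
  if !(st.2.any (fun u => PySem.Str.isIn s u)) then (st.1 ++ [s], st.2.add s) else st

def pvPerValueA (substrings : List String) : List String :=
  ((pvSortDesc substrings).foldl pvStepA ([], PySem.Set.empty)).1

def remove_substrings_within_longer (data : List (String × String)) : List (String × String) :=
  ((pvGroup data).items.foldl
    (fun r q => (pvPerValueA q.2).foldl (fun r s => r.insert s q.1) r)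
    (PySem.Dict.empty : PySem.Dict String String)).items

-- ===== PORT B =====
-- B's filter: keep s iff no strictly longer string of its own group contains it
def pvKeepB (subs : List String) (s : String) : Bool :=
  !(subs.any (fun t => decide (PySem.Str.len s < PySem.Str.len t) && PySem.Str.isIn s t))

def remove_substrings_within_longer_alt (data : List (String × String)) : List (String × String) :=
  ((pvGroup data).items.foldl
    (fun r q => ((pvSortDesc q.2).filter (pvKeepB q.2)).foldl (fun r s => r.insert s q.1) r)
    (PySem.Dict.empty : PySem.Dict String String)).items

-- ===== PRECONDITION & SPEC =====
-- Pre_ excludes association lists with duplicate keys: they cannot arise from the Python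
-- dict argument, so the ports' behaviour on them is an artefact of the list representation.
def Pre_remove_substrings_within_longer (data : List (String × String)) : Prop :=
  (data.map Prod.fst).Nodup
instance (data : List (String × String)) : Decidable (Pre_remove_substrings_within_longer data) := by unfold Pre_remove_substrings_within_longer; infer_instance

def pvWitness_remove_substrings_within_longer : (List (String × String)) :=
  [("ab", "x"), ("b", "x"), ("c", "y")]

def Spec_remove_substrings_within_longer (data : List (String × String)) (out : List (String × String)) : Prop := out = remove_substrings_within_longer_alt data
instance (data : List (String × String)) (out : List (String × String)) : Decidable (Spec_remove_substrings_within_longer data out) := by unfold Spec_remove_substrings_within_longer; infer_instance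

-- ===== CLAIM (what is proved, stated in full; the proofs are below) =====
def Claim_equal_remove_substrings_within_longer : Prop := ∀ (data : List (String × String)), Dom_remove_substrings_within_longer data → Pre_remove_substrings_within_longer data → Spec_remove_substrings_within_longer data (remove_substrings_within_longer data)

-- ===== LEMMAS AND PROOFS =====

lemma pvGStep_getD (g : PySem.Dict String (List String)) (p : String × String) (lab : String) :
    (pvGStep g p).getD lab [] = if lab = p.2 then g.getD p.2 [] ++ [p.1] else g.getD lab [] := by
  unfold pvGStep
  by_cases hc : g.contains p.2 = true
  · simp [hc, PySem.Dict.getD_modify]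
  · have h0 : g.getD p.2 ([] : List String) = [] :=
      PySem.Dict.getD_of_not_contains g [] (by simpa using hc)
    rw [if_neg (by simp [hc])]
    simp [PySem.Dict.getD_modify, PySem.Dict.getD_insert, h0]
    split_ifs <;> rfl

lemma pvGStep_keys_nodup (g : PySem.Dict String (List String)) (p : String × String)
    (h : g.keys.Nodup) : (pvGStep g p).keys.Nodup := by
  unfold pvGStep
  by_cases hc : g.contains p.2 = true
  · rw [if_pos hc, PySem.Dict.keys_modify, PySem.Dict.keys_insert_of_contains _ _ hc]
    exact h
  · have hc' : g.contains p.2 = false := by simpa using hc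
    rw [if_neg (by simp [hc]), PySem.Dict.keys_modify,
        PySem.Dict.keys_insert_of_contains _ _ (PySem.Dict.contains_insert_self _ _ _),
        PySem.Dict.keys_insert_of_not_contains g [] hc']
    simp only [List.nodup_append, h, List.nodup_cons, List.nodup_nil, true_and, List.not_mem_nil,
      not_false_iff]
    intro a ha b hb
    rcases List.mem_singleton.mp hb with rfl
    intro hab
    exact (by simp [hc'] : ¬ g.contains p.2 = true)
      ((PySem.Dict.contains_iff_mem_keys g p.2).mpr (hab ▸ ha))

lemma pvGroup_keys_nodup : ∀ (data : List (String × String)) (g : PySem.Dict String (List String)),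
    g.keys.Nodup → ((data.foldl pvGStep g).keys).Nodup := by
  intro data
  induction data with
  | nil => intro g h; exact h
  | cons p rest ih => intro g h; exact ih _ (pvGStep_keys_nodup g p h)

lemma pvGroup_values_nodup : ∀ (data : List (String × String)) (g : PySem.Dict String (List String)),
    (data.map Prod.fst).Nodup →
    (∀ lab : String, ((g.getD lab []).Nodup ∧ ∀ s ∈ g.getD lab [], s ∉ data.map Prod.fst)) →
    ∀ lab : String, ((data.foldl pvGStep g).getD lab []).Nodup := by
  intro data
  induction data with
  | nil => intro g _ hinv lab; exact (hinv lab).1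
  | cons p rest ih =>
    intro g hnd hinv lab
    simp only [List.map_cons, List.nodup_cons] at hnd
    refine ih (pvGStep g p) hnd.2 ?_ lab
    intro lab'
    rw [pvGStep_getD]
    by_cases he : lab' = p.2
    · rw [if_pos he]
      refine ⟨?_, ?_⟩
      · have h1 := (hinv p.2).1
        have h2 : p.1 ∉ g.getD p.2 [] := fun hm => (hinv p.2).2 p.1 hm (by simp)
        have : (g.getD p.2 [] ++ [p.1]).Nodup ↔ _ := List.nodup_append
        rw [this]
        refine ⟨h1, by simp, ?_⟩
        intro a ha b hb
        rcases List.mem_singleton.mp hb with rfl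
        exact fun hab => h2 (hab ▸ ha)
      · intro s hs
        rcases List.mem_append.mp hs with hs | hs
        · exact fun hm => (hinv p.2).2 s hs (by simp [hm])
        · rcases List.mem_singleton.mp hs with rfl
          exact hnd.1
    · rw [if_neg he]
      exact ⟨(hinv lab').1, fun s hs hm => (hinv lab').2 s hs (by simp [hm])⟩

lemma pvExistsMaxLen (l : List String) (hl : l ≠ []) :
    ∃ u ∈ l, ∀ v ∈ l, PySem.Str.len v ≤ PySem.Str.len u := by
  cases hm : l.argmax PySem.Str.len with
  | none => exact absurd (List.argmax_eq_none.mp hm) hl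
  | some u => exact ⟨u, List.argmax_mem hm, fun v hv => List.le_of_mem_argmax hv hm⟩

lemma pvEqOfInfixLen (s u : String) (hin : PySem.Str.isIn s u = true)
    (hle : PySem.Str.len u ≤ PySem.Str.len s) : s = u := by
  have hi := (PySem.Str.isIn_iff_infix s u).mp hin
  rw [PySem.Str.len_eq, PySem.Str.len_eq] at hle
  exact String.toList_inj.mp (List.IsInfix.eq_of_length_le hi (by exact_mod_cast hle))

lemma pvInfix_trans (s u v : String) (h1 : PySem.Str.isIn s u = true)
    (h2 : PySem.Str.isIn u v = true) : PySem.Str.isIn s v = true := by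
  rw [PySem.Str.isIn_iff_infix] at *
  exact h1.trans h2

lemma pvCond (subs : List String) (hs : subs.Nodup) (pre : List String) (s : String)
    (suf : List String) (h : pvSortDesc subs = pre ++ s :: suf) :
    ((pre.filter (pvKeepB subs)).any (fun u => PySem.Str.isIn s u)) = !(pvKeepB subs s) := by
  have hperm : (pre ++ s :: suf).Perm subs := h ▸ PySem.List.sorted_perm subs _ false
  have hnd : (pre ++ s :: suf).Nodup := hperm.nodup_iff.mpr hs
  have hpw : (pre ++ s :: suf).Pairwise
      (fun a b => -(PySem.Str.len a) ≤ -(PySem.Str.len b)) :=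
    h ▸ PySem.List.sorted_pairwise subs (fun x => -(PySem.Str.len x))
  obtain ⟨-, hpw2, hcross⟩ := List.pairwise_append.mp hpw
  have hdisj := (List.nodup_append.mp hnd).2.2
  have hnotP : (!(pvKeepB subs s)) = subs.any
      (fun t => decide (PySem.Str.len s < PySem.Str.len t) && PySem.Str.isIn s t) := by
    simp [pvKeepB]
  rw [hnotP]
  rw [Bool.eq_iff_iff]
  simp only [List.any_eq_true, List.mem_filter, Bool.and_eq_true, decide_eq_true_eq]
  constructor
  · rintro ⟨u, ⟨hupre, hPu⟩, hin⟩
    have hle : PySem.Str.len s ≤ PySem.Str.len u := by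
      have := hcross u hupre s (List.mem_cons_self)
      omega
    have hne : s ≠ u := by
      intro hsu
      exact (hdisj u hupre s List.mem_cons_self) hsu.symm
    have hlt : PySem.Str.len s < PySem.Str.len u := by
      rcases lt_or_eq_of_le hle with hlt | heq
      · exact hlt
      · exact absurd (pvEqOfInfixLen s u hin heq.ge) hne
    exact ⟨u, hperm.mem_iff.mp (List.mem_append.mpr (Or.inl hupre)), hlt, hin⟩
  · rintro ⟨t, htsubs, hlt, hin⟩
    set C := subs.filter (fun t => decide (PySem.Str.len s < PySem.Str.len t) && PySem.Str.isIn s t) with hC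
    have htC : t ∈ C := List.mem_filter.mpr
      ⟨htsubs, by rw [Bool.and_eq_true, decide_eq_true_eq]; exact ⟨hlt, hin⟩⟩
    obtain ⟨u, huC, humax⟩ := pvExistsMaxLen C (List.ne_nil_of_mem htC)
    have hu := List.mem_filter.mp huC
    have husubs : u ∈ subs := hu.1
    have hu2 : PySem.Str.len s < PySem.Str.len u ∧ PySem.Str.isIn s u = true := by
      simpa using hu.2
    have hPu : pvKeepB subs u = true := by
      by_contra hPu
      have : subs.any (fun v => decide (PySem.Str.len u < PySem.Str.len v) && PySem.Str.isIn u v) = true := by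
        simpa [pvKeepB] using hPu
      simp only [List.any_eq_true, Bool.and_eq_true, decide_eq_true_eq] at this
      obtain ⟨v, hvsubs, hlv, hiv⟩ := this
      have hvC : v ∈ C := by
        simp only [hC, List.mem_filter, Bool.and_eq_true, decide_eq_true_eq]
        exact ⟨hvsubs, lt_trans hu2.1 hlv, pvInfix_trans s u v hu2.2 hiv⟩
      exact absurd (humax v hvC) (by omega)
    have humem : u ∈ pre ++ s :: suf := hperm.mem_iff.mpr husubs
    have hupre : u ∈ pre := by
      rcases List.mem_append.mp humem with h1 | h1
      · exact h1
      · rcases List.mem_cons.mp h1 with rfl | h1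
        · exact absurd hu2.1 (by omega)
        · have := (List.pairwise_cons.mp hpw2).1 u h1
          exact absurd hu2.1 (by omega)
    exact ⟨u, ⟨hupre, hPu⟩, hu2.2⟩

lemma pvStepA_eq (A : List String) (s : String) :
    pvStepA (A, (A : PySem.Set String)) s =
      if !(A.any (fun u => PySem.Str.isIn s u)) then (A ++ [s], PySem.Set.add A s) else (A, A) := rfl

lemma pvLoop (subs : List String) (hs : subs.Nodup) :
    ∀ (l pre : List String), pvSortDesc subs = pre ++ l →
    (l.foldl pvStepA (pre.filter (pvKeepB subs), (pre.filter (pvKeepB subs) : PySem.Set String))).1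
      = pre.filter (pvKeepB subs) ++ l.filter (pvKeepB subs) := by
  intro l
  induction l with
  | nil => intro pre h; simp
  | cons s l' ih =>
    intro pre h
    have hnd : (pre ++ s :: l').Nodup := by
      rw [← h]
      exact ((PySem.List.sorted_perm subs _ false).nodup_iff).mpr hs
    have hspre : s ∉ pre := fun hm =>
      (List.nodup_append.mp hnd).2.2 s hm s List.mem_cons_self rfl
    have hcond := pvCond subs hs pre s l' h
    rw [List.foldl_cons]
    by_cases hP : pvKeepB subs s = true
    · have : pvStepA (pre.filter (pvKeepB subs), (pre.filter (pvKeepB subs) : PySem.Set String)) s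
          = ((pre ++ [s]).filter (pvKeepB subs), ((pre ++ [s]).filter (pvKeepB subs) : PySem.Set String)) := by
        rw [pvStepA_eq, hcond, hP]
        have hadd : PySem.Set.add (pre.filter (pvKeepB subs)) s = pre.filter (pvKeepB subs) ++ [s] :=
          PySem.Set.add_of_not_mem (fun hm => hspre (List.mem_of_mem_filter hm))
        rw [if_pos (by decide), hadd]
        simp [List.filter_append, hP]
      rw [this, ih (pre ++ [s]) (by rw [h, List.append_assoc]; rfl)]
      simp [List.filter_append, hP, List.append_assoc]
    · have hPf : pvKeepB subs s = false := by simpa using hP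
      have : pvStepA (pre.filter (pvKeepB subs), (pre.filter (pvKeepB subs) : PySem.Set String)) s
          = (pre.filter (pvKeepB subs), (pre.filter (pvKeepB subs) : PySem.Set String)) := by
        rw [pvStepA_eq, hcond, hPf]
        simp
      rw [this]
      have hfe : pre.filter (pvKeepB subs) = (pre ++ [s]).filter (pvKeepB subs) := by
        simp [List.filter_append, hPf]
      rw [hfe, ih (pre ++ [s]) (by rw [h, List.append_assoc]; rfl)]
      simp [List.filter_append, hPf]

lemma pvPer_eq_filter (subs : List String) (hs : subs.Nodup) :
    pvPerValueA subs = (pvSortDesc subs).filter (pvKeepB subs) := by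
  have := pvLoop subs hs (pvSortDesc subs) [] (by simp)
  simpa [pvPerValueA, PySem.Set.empty] using this

-- ===== VERDICT (by name: the statement is the Claim_ definition above) =====
theorem remove_substrings_within_longer_spec : Claim_equal_remove_substrings_within_longer := by
  intro data _hdom hpre
  unfold Spec_remove_substrings_within_longer
  unfold remove_substrings_within_longer remove_substrings_within_longer_alt
  have hkeys : (pvGroup data).keys.Nodup :=
    pvGroup_keys_nodup data PySem.Dict.empty (by simp [PySem.Dict.keys_empty])
  have hval : ∀ lab : String, ((pvGroup data).getD lab []).Nodup :=
    pvGroup_values_nodup data PySem.Dict.empty hpre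
      (by intro lab; simp [PySem.Dict.getD_empty])
  refine congrArg PySem.Dict.items ?_
  apply PySem.List.foldl_congr_mem
  intro r q hq
  have hmem : (q.1, q.2) ∈ (pvGroup data).items := by simpa using hq
  have hq2 : (pvGroup data).getD q.1 [] = q.2 :=
    PySem.Dict.getD_of_mem_items _ hmem hkeys []
  have hnd : q.2.Nodup := hq2 ▸ hval q.1
  rw [pvPer_eq_filter q.2 hnd]
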